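-- pv_equiv track=rewrite | github.com/zk-zgd/SAC | HYPE/hype-sharding-30015.py | get_node_efficiencies
-- ===== SOURCE A (Python) =====
-- N = 300  # 节点数
--
-- def get_node_efficiencies(node_shard_history, shard_efficiencies, node_in_shard):
--     node_efficiencies = [0] * N
--     # 计算每个分片之前的节点数总和，用于全局ID的计算
--     shard_offset = [0] * len(node_in_shard)
--     for i in range(1, len(node_in_shard)):
--         shard_offset[i] = shard_offset[i - 1] + node_in_shard[i - 1]
--
--     # 分片历史中的节点ID对应其全局ID，并赋予效率
--     for shard_id, node_list in node_shard_history.items():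
--         for node_id in node_list:
--             global_node_id = shard_offset[shard_id] + node_id  # 计算全局节点ID
--             node_efficiencies[global_node_id] = shard_efficiencies[shard_id]
--
--     return node_efficiencies
-- ===== SOURCE B (Python) =====
-- N = 300  # number of nodes
--
-- def get_node_efficiencies(node_shard_history, shard_efficiencies, node_in_shard):
--     node_efficiencies = [0] * N
--     # no precomputed offset table: each shard's global offset is the sum of
--     # the node counts of the shards before it, read off the list directly
--     for shard_id, node_list in node_shard_history.items():
--         offset = sum(node_in_shard[:shard_id])
--         for node_id in node_list:
--             node_efficiencies[offset + node_id] = shard_efficiencies[shard_id]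
--     return node_efficiencies
-- ===== Notes on version B (the rewrite author's own statement) =====
-- stated objective: simpler
-- what changed: B drops A's precomputed prefix-sum offset table and instead computes each shard's global offset on the fly as sum(node_in_shard[:shard_id]); Pre_ additionally excludes duplicate shard ids in the history, which a Python dict cannot represent.
import Mathlib
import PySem

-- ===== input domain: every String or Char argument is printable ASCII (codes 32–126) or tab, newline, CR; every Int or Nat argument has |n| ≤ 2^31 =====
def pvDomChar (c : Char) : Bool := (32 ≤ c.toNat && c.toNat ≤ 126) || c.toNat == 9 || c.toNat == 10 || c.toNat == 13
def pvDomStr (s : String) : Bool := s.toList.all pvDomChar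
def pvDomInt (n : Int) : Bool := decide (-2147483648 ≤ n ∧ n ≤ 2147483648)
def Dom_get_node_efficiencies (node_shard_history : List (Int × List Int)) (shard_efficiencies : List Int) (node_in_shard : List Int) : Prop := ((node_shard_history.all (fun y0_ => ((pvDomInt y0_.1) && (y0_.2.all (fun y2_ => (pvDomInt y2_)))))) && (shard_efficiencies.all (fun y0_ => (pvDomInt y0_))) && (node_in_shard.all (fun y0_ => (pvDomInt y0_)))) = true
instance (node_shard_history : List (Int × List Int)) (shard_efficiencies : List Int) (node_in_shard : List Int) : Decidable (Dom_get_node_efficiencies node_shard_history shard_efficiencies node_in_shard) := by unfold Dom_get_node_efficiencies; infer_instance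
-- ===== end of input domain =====

-- ===== PORT A =====
-- B drops A's precomputed prefix-sum offset table and computes each shard's
-- offset as the sum of a prefix slice; objective: simpler.
def get_node_efficiencies (node_shard_history : List (Int × List Int)) (shard_efficiencies : List Int) (node_in_shard : List Int) : List Int :=
  let shard_offset :=
    (PySem.List.pyRange 1 (node_in_shard.length : Int) 1).foldl
      (fun so i =>
        PySem.List.pySetD so i
          (PySem.List.pyGetD so (i - 1) 0 + PySem.List.pyGetD node_in_shard (i - 1) 0))
      (List.replicate node_in_shard.length (0 : Int))
  node_shard_history.foldl
    (fun ne p =>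
      p.2.foldl
        (fun ne node_id =>
          PySem.List.pySetD ne (PySem.List.pyGetD shard_offset p.1 0 + node_id)
            (PySem.List.pyGetD shard_efficiencies p.1 0))
        ne)
    (List.replicate 300 (0 : Int))

-- ===== PORT B =====
def get_node_efficiencies_alt (node_shard_history : List (Int × List Int)) (shard_efficiencies : List Int) (node_in_shard : List Int) : List Int :=
  node_shard_history.foldl
    (fun ne p =>
      let offset := (PySem.List.slice node_in_shard none (some p.1)).sum
      p.2.foldl
        (fun ne node_id =>
          PySem.List.pySetD ne (offset + node_id)
            (PySem.List.pyGetD shard_efficiencies p.1 0))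
        ne)
    (List.replicate 300 (0 : Int))

-- ===== PRECONDITION & SPEC =====
-- Pre_ admits exactly the inputs on which the Python A returns (every index access in
-- range, incl. Python's negative indexing); it also excludes duplicate shard ids in the
-- history, which a Python dict cannot represent (the assoc list stands for a dict).
def Pre_get_node_efficiencies (node_shard_history : List (Int × List Int)) (shard_efficiencies : List Int) (node_in_shard : List Int) : Prop :=
  (node_shard_history.map Prod.fst).Nodup ∧
  ∀ p ∈ node_shard_history, ∀ node_id ∈ p.2,
    PySem.Raise.InRange node_in_shard.length p.1 ∧
    PySem.Raise.InRange shard_efficiencies.length p.1 ∧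
    PySem.Raise.InRange 300 ((PySem.List.slice node_in_shard none (some p.1)).sum + node_id)
instance (node_shard_history : List (Int × List Int)) (shard_efficiencies : List Int) (node_in_shard : List Int) : Decidable (Pre_get_node_efficiencies node_shard_history shard_efficiencies node_in_shard) := by unfold Pre_get_node_efficiencies; infer_instance

def pvWitness_get_node_efficiencies : (List (Int × List Int)) × List Int × List Int :=
  ([(0, [0, 1]), (1, [0])], [5, 7], [2, 1])

def Spec_get_node_efficiencies (node_shard_history : List (Int × List Int)) (shard_efficiencies : List Int) (node_in_shard : List Int) (out : List Int) : Prop := out = get_node_efficiencies_alt node_shard_history shard_efficiencies node_in_shard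
instance (node_shard_history : List (Int × List Int)) (shard_efficiencies : List Int) (node_in_shard : List Int) (out : List Int) : Decidable (Spec_get_node_efficiencies node_shard_history shard_efficiencies node_in_shard out) := by unfold Spec_get_node_efficiencies; infer_instance

-- ===== CLAIM (what is proved, stated in full; the proofs are below) =====
def Claim_equal_get_node_efficiencies : Prop := ∀ (node_shard_history : List (Int × List Int)) (shard_efficiencies : List Int) (node_in_shard : List Int), Dom_get_node_efficiencies node_shard_history shard_efficiencies node_in_shard → Pre_get_node_efficiencies node_shard_history shard_efficiencies node_in_shard → Spec_get_node_efficiencies node_shard_history shard_efficiencies node_in_shard (get_node_efficiencies node_shard_history shard_efficiencies node_in_shard)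

-- ===== LEMMAS AND PROOFS =====

-- A's first loop builds exactly the table of prefix sums of node_in_shard.
theorem pv_offsets_eq (nis : List Int) (n : Nat) (hn : n ≤ nis.length) :
    (PySem.List.pyRange 1 (n : Int) 1).foldl
      (fun so i =>
        PySem.List.pySetD so i
          (PySem.List.pyGetD so (i - 1) 0 + PySem.List.pyGetD nis (i - 1) 0))
      (List.replicate nis.length (0 : Int))
    = (List.range nis.length).map (fun j => if j < n then (nis.take j).sum else 0) := by
  induction n with
  | zero =>
      rw [PySem.List.pyRange_one_eq_nil (by norm_num)]
      apply List.ext_getElem (by simp)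
      intro j h1 h2
      simp
  | succ n ih =>
      rcases Nat.eq_zero_or_pos n with h0 | hpos
      · subst h0
        rw [show (((0 : Nat) + 1 : Nat) : Int) = 1 by norm_num,
            PySem.List.pyRange_one_eq_nil (by norm_num)]
        apply List.ext_getElem (by simp)
        intro j h1 h2
        simp only [List.foldl_nil, List.getElem_replicate, List.getElem_map, List.getElem_range]
        by_cases hj : j < 0 + 1
        · have : j = 0 := by omega
          subst this; simp
        · rw [if_neg hj]
      · obtain ⟨m, rfl⟩ : ∃ m, n = m + 1 := ⟨n - 1, by omega⟩
        have hn1 : m < nis.length := by omega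
        have hsum : (nis.take (m + 1)).sum = (nis.take m).sum + nis[m] :=
          List.sum_take_succ nis m hn1
        have hcast : ((m + 1 + 1 : Nat) : Int) = ((m + 1 : Nat) : Int) + 1 := by push_cast; ring
        rw [hcast, PySem.List.pyRange_one_succ_right (by exact_mod_cast hpos),
            List.foldl_append, ih (by omega)]
        simp only [List.foldl_cons, List.foldl_nil]
        have hstep : (((m + 1 : Nat) : Int) - 1) = ((m : Nat) : Int) := by push_cast; ring
        rw [hstep, PySem.List.pyGetD_natCast, PySem.List.pyGetD_natCast]
        rw [List.getD_eq_getElem _ _ (by simpa using hn1), List.getD_eq_getElem _ _ hn1]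
        simp only [List.getElem_map, List.getElem_range]
        rw [if_pos (by omega), PySem.List.pySetD_natCast]
        apply List.ext_getElem (by simp)
        intro j h1 h2
        simp only [List.getElem_set, List.getElem_map, List.getElem_range]
        by_cases hj : m + 1 = j
        · rw [if_pos hj, if_pos (by omega), ← hj, hsum]
        · rw [if_neg hj]
          by_cases hlt : j < m + 1
          · rw [if_pos hlt, if_pos (by omega)]
          · rw [if_neg hlt, if_neg (by omega)]

-- Reading the prefix-sum table at a Python index (possibly negative) is the slice sum.
theorem pv_offset_read (nis : List Int) (sid : Int)
    (h : PySem.Raise.InRange nis.length sid) :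
    PySem.List.pyGetD
      ((List.range nis.length).map (fun j => if j < nis.length then (nis.take j).sum else 0))
      sid 0
    = (PySem.List.slice nis none (some sid)).sum := by
  by_cases hpos : 0 ≤ sid
  · have hlt : sid.toNat < nis.length := by
      simp [PySem.Raise.InRange] at h; omega
    rw [show sid = ((sid.toNat : Nat) : Int) by omega, PySem.List.pyGetD_natCast,
        PySem.List.slice_to_natCast, List.getD_eq_getElem _ _ (by simpa using hlt)]
    simp only [List.getElem_map, List.getElem_range]
    rw [if_pos hlt]
  · have hk0 : 0 < (-sid).toNat := by omega
    have hkle : (-sid).toNat ≤ nis.length := by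
      simp [PySem.Raise.InRange] at h; omega
    rw [show sid = -(((-sid).toNat : Nat) : Int) by omega,
        PySem.List.pyGetD_neg_natCast _ _ _ hk0 (by simpa using hkle),
        PySem.List.slice_to_neg_natCast nis ((-sid).toNat) hk0]
    simp only [List.getElem_map, List.getElem_range, List.length_map, List.length_range]
    rw [if_pos (by omega)]

-- A's second loop, reading the prefix-sum table, agrees with B's fold step by step.
theorem pv_fold_eq (nis se : List Int) (h : List (Int × List Int))
    (hpre2 : ∀ p ∈ h, ∀ node_id ∈ p.2,
      PySem.Raise.InRange nis.length p.1 ∧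
      PySem.Raise.InRange se.length p.1 ∧
      PySem.Raise.InRange 300 ((PySem.List.slice nis none (some p.1)).sum + node_id))
    (ne : List Int) :
    h.foldl
      (fun ne p =>
        p.2.foldl
          (fun ne node_id =>
            PySem.List.pySetD ne
              (PySem.List.pyGetD
                ((List.range nis.length).map
                  (fun j => if j < nis.length then (nis.take j).sum else 0)) p.1 0 + node_id)
              (PySem.List.pyGetD se p.1 0))
          ne)
      ne
    = h.foldl
        (fun ne p =>
          p.2.foldl
            (fun ne node_id =>
              PySem.List.pySetD ne ((PySem.List.slice nis none (some p.1)).sum + node_id)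
                (PySem.List.pyGetD se p.1 0))
            ne)
        ne := by
  induction h generalizing ne with
  | nil => rfl
  | cons p t iht =>
      simp only [List.foldl_cons]
      have htail := fun q hq => hpre2 q (List.mem_cons_of_mem p hq)
      by_cases hnil : p.2 = []
      · rw [hnil]
        exact iht htail _
      · obtain ⟨nid, hnid⟩ := List.exists_mem_of_ne_nil p.2 hnil
        have hin := (hpre2 p List.mem_cons_self nid hnid).1
        rw [pv_offset_read nis p.1 hin]
        exact iht htail _

-- ===== VERDICT (by name: the statement is the Claim_ definition above) =====
theorem get_node_efficiencies_spec : Claim_equal_get_node_efficiencies := by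
  intro h se nis dom hpre
  obtain ⟨-, hpre2⟩ := hpre
  unfold Spec_get_node_efficiencies get_node_efficiencies get_node_efficiencies_alt
  rw [pv_offsets_eq nis nis.length le_rfl]
  exact pv_fold_eq nis se h hpre2 _
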